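-- pv_equiv track=rewrite | github.com/1ELM7/L1SN_Tlse3_PaulSabatier | Pixal/Progresser/L1S1_OMD/Seance2/Pire cas/pireCas.py | pireCas
-- ===== SOURCE A (Python) =====
-- def divEucl(a,b):
--     q=0
--     r=a
--
--     if (a>=0):
--         while (r>=b):
--             r=r-b
--             q=q+1
--     else:
--         while (r<0):
--             r=r+b
--             q=q-1
--
--     return (q,r)
--
-- def euclide(a,b):
--     x,y,s,t,u,v,count=a,b,1,0,0,1,0
--
--     while y>0:
--         (q,r) = divEucl(x,y)
--         count+=1
--         (x,y) = (y,r)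
--         (s,t,u,v) = (u,v,s-q*u,t-q*v)
--
--     return count
--
-- def pireCas(n):
--     maxi = 0
--     for i in range (1,n):
--         temp = euclide(n,i)
--         if temp>maxi:
--             maxi=temp
--             plus=i
--
--     return maxi
-- ===== SOURCE B (Python) =====
-- def euclide(a, b):
--     return 0 if b == 0 else 1 + euclide(b, a % b)
--
-- def pireCas(n):
--     return max((euclide(n, i) for i in range(1, n)), default=0)
-- ===== Notes on version B (the rewrite author's own statement) =====
-- stated objective: faster
-- what changed: The iterative euclide with repeated-subtraction division (divEucl) and dead extended-gcd accumulators (s,t,u,v) is replaced by a direct recursion that counts a step and recurses on (b, a % b) until the second argument vanishes, and pireCas becomes a max over a generator.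
import Mathlib
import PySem

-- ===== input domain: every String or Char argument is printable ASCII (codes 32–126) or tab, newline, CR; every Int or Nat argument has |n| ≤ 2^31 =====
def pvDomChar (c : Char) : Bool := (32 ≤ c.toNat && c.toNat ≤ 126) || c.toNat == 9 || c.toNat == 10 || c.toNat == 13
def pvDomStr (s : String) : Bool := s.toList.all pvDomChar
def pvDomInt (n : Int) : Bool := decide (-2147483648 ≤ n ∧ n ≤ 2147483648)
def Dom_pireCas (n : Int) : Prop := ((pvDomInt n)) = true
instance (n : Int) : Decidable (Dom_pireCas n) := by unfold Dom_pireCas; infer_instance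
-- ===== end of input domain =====

-- B replaces A's repeated-subtraction division and dead extended-gcd bookkeeping by a direct
-- recursion on (b, a % b) and takes a max over a generator (objective: faster — the builtin
-- '%' instead of repeated subtraction inside each Euclid step; measured).

-- ===== PORT A =====
-- A's while-loops are ported with a fuel counter large enough for every input on which the
-- Python loop terminates (proved in the lemmas below); where Python diverges (b <= 0 inside
-- divEucl), the fuel runs out and nothing is claimed, since those calls are never reached.

-- 'while r >= b: r -= b; q += 1'
def dLoopPos : Nat → Int → Int → Int → Int × Int
  | 0, _, q, r => (q, r)
  | fuel + 1, b, q, r => if b ≤ r then dLoopPos fuel b (q + 1) (r - b) else (q, r)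

-- 'while r < 0: r += b; q -= 1'
def dLoopNeg : Nat → Int → Int → Int → Int × Int
  | 0, _, q, r => (q, r)
  | fuel + 1, b, q, r => if r < 0 then dLoopNeg fuel b (q - 1) (r + b) else (q, r)

def divEucl (a b : Int) : Int × Int :=
  if a ≥ 0 then dLoopPos (a.toNat + 1) b 0 a else dLoopNeg ((-a).toNat + 1) b 0 a

-- 'while y > 0' of euclide, carrying the full (x,y,s,t,u,v,count) state
def eLoop : Nat → Int → Int → Int → Int → Int → Int → Int → Int
  | 0, _, _, _, _, _, _, count => count
  | fuel + 1, x, y, s, t, u, v, count =>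
    if 0 < y then
      let p := divEucl x y
      eLoop fuel y p.2 u v (s - p.1 * u) (t - p.1 * v) (count + 1)
    else count

def euclide (a b : Int) : Int := eLoop (b.toNat + 1) a b 1 0 0 1 0

def pireCas (n : Int) : Int :=
  (PySem.List.pyRange 1 n 1).foldl
    (fun maxi i => let temp := euclide n i; if temp > maxi then temp else maxi) 0

-- ===== PORT B =====
def steps (a b : Int) : Int :=
  if b == 0 then 0 else 1 + steps b (PySem.Int.mod a b)
termination_by b.natAbs
decreasing_by
  rename_i h
  by_cases hb : 0 < b
  · have h1 := PySem.Int.mod_nonneg (a := a) (b := b) hb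
    have h2 := PySem.Int.mod_lt (a := a) (b := b) hb
    omega
  · have hb' : b < 0 := by simp at h; omega
    have := PySem.Int.mod_neg_bounds (a := a) (b := b) hb'
    omega

def pireCas_alt (n : Int) : Int :=
  ((PySem.List.pyRange 1 n 1).map (fun i => steps n i)).foldl max 0

-- ===== PRECONDITION & SPEC =====
def Spec_pireCas (n : Int) (out : Int) : Prop := out = pireCas_alt n
instance (n : Int) (out : Int) : Decidable (Spec_pireCas n out) := by unfold Spec_pireCas; infer_instance

-- ===== CLAIM (what is proved, stated in full; the proofs are below) =====
def Claim_equal_pireCas : Prop := ∀ (n : Int), Dom_pireCas n → Spec_pireCas n (pireCas n)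

-- ===== LEMMAS AND PROOFS =====
theorem dLoopPos_eq (f : Nat) (b q r : Int) (hb : 0 < b) (hr : 0 ≤ r) (hf : r < (f : Int)) :
    dLoopPos f b q r = (q + PySem.Int.floordiv r b, PySem.Int.mod r b) := by
  induction f generalizing q r with
  | zero => omega
  | succ f ih =>
    rw [dLoopPos]
    by_cases h : b ≤ r
    · rw [if_pos h, ih (q + 1) (r - b) (by omega) (by omega)]
      rw [PySem.Int.floordiv_eq_ediv_of_pos hb, PySem.Int.floordiv_eq_ediv_of_pos hb,
          PySem.Int.mod_eq_emod_of_pos hb, PySem.Int.mod_eq_emod_of_pos hb]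
      have h1 : (r - b) / b = r / b - 1 := by
        have := Int.add_mul_ediv_right r (-1) (by omega : b ≠ 0); simpa [sub_eq_add_neg] using this
      have h2 : (r - b) % b = r % b := Int.sub_emod_right r b
      rw [h1, h2, Prod.mk.injEq]
      exact ⟨by ring, rfl⟩
    · rw [if_neg h]
      rw [PySem.Int.floordiv_eq_ediv_of_pos hb, PySem.Int.mod_eq_emod_of_pos hb]
      rw [Int.ediv_eq_zero_of_lt hr (by omega), Int.emod_eq_of_lt hr (by omega)]
      simp

theorem dLoopNeg_eq (f : Nat) (b q r : Int) (hb : 0 < b) (hr : r < b) (hf : -r < (f : Int)) :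
    dLoopNeg f b q r = (q + PySem.Int.floordiv r b, PySem.Int.mod r b) := by
  induction f generalizing q r with
  | zero =>
    rw [dLoopNeg, PySem.Int.floordiv_eq_ediv_of_pos hb, PySem.Int.mod_eq_emod_of_pos hb,
        Int.ediv_eq_zero_of_lt (by omega) (by omega), Int.emod_eq_of_lt (by omega) (by omega)]
    simp
  | succ f ih =>
    rw [dLoopNeg]
    by_cases h : r < 0
    · rw [if_pos h, ih (q - 1) (r + b) (by omega) (by omega)]
      rw [PySem.Int.floordiv_eq_ediv_of_pos hb, PySem.Int.floordiv_eq_ediv_of_pos hb,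
          PySem.Int.mod_eq_emod_of_pos hb, PySem.Int.mod_eq_emod_of_pos hb]
      have h1 : (r + b) / b = r / b + 1 := by
        have := Int.add_mul_ediv_right r 1 (by omega : b ≠ 0); simpa using this
      have h2 : (r + b) % b = r % b := by simp
      rw [h1, h2, Prod.mk.injEq]
      exact ⟨by ring, rfl⟩
    · rw [if_neg h]
      rw [PySem.Int.floordiv_eq_ediv_of_pos hb, PySem.Int.mod_eq_emod_of_pos hb]
      rw [Int.ediv_eq_zero_of_lt (by omega) (by omega), Int.emod_eq_of_lt (by omega) (by omega)]
      simp

theorem divEucl_eq (a b : Int) (hb : 0 < b) :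
    divEucl a b = (PySem.Int.floordiv a b, PySem.Int.mod a b) := by
  unfold divEucl
  by_cases h : a ≥ 0
  · rw [if_pos h]
    exact (dLoopPos_eq _ b 0 a hb (by omega) (by push_cast; omega)).trans (by simp)
  · rw [if_neg h]
    exact (dLoopNeg_eq _ b 0 a hb (by omega) (by push_cast; omega)).trans (by simp)

theorem eLoop_eq (f : Nat) (x y s t u v count : Int) (hy : 0 ≤ y) (hf : y < (f : Int)) :
    eLoop f x y s t u v count = count + steps x y := by
  induction f generalizing x y s t u v count with
  | zero => omega
  | succ f ih =>
    rw [eLoop, steps]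
    by_cases h : 0 < y
    · rw [if_pos h, if_neg (by simp; omega)]
      simp only [divEucl_eq x y h]
      have h1 := PySem.Int.mod_nonneg (a := x) (b := y) h
      have h2 := PySem.Int.mod_lt (a := x) (b := y) h
      rw [ih y (PySem.Int.mod x y) _ _ _ _ _ h1 (by omega)]
      ring
    · rw [if_neg h, if_pos (by simp; omega)]
      omega

theorem euclide_eq_steps (a b : Int) (hb : 0 ≤ b) : euclide a b = steps a b := by
  simpa using eLoop_eq (b.toNat + 1) a b 1 0 0 1 0 hb (by push_cast; omega)

theorem pireCas_eq (n : Int) : pireCas n = pireCas_alt n := by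
  unfold pireCas pireCas_alt
  rw [List.foldl_map]
  apply PySem.List.foldl_congr_mem
  intro m i hi
  have hpos : 1 ≤ i := (PySem.List.mem_pyRange_one.mp hi).1
  rw [euclide_eq_steps n i (by omega)]
  simp only [max_def]
  split_ifs <;> omega

-- ===== VERDICT (by name: the statement is the Claim_ definition above) =====
theorem pireCas_spec : Claim_equal_pireCas := by
  intro n _
  unfold Spec_pireCas
  exact pireCas_eq n
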